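-- pv_equiv track=rewrite | github.com/hachalick/bazyabi_403_nahaei | classes/IR.py | sort_dict_token_based_list
-- ===== SOURCE A (Python) =====
-- def sort_dict_token_based_list(dict_token: dict, arr_sort: list, limit_show: int = -1) -> dict:
--     """
--     get dictionary of token - frequency and sorted based list int with optional limit show
--     :param dict_token:dict -> { word: { frequency: 0, title: "...", plot: "...", }, ... }
--     :param arr_sort:list -> [ high, ..., low ]
--     :param limit_show:int -> -1: don't limit
--     :return:
--     """
--     show_dict = {}
--     del_dict = {}
--     for i in arr_sort:
--         for j in dict_token:
--             if limit_show < 0 and dict_token[j] == i: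
--                 show_dict[j] = i
--             elif limit_show >= i and dict_token[j] == i:
--                 show_dict[j] = i
--             elif limit_show < i and dict_token[j] == i:
--                 del_dict[j] = i
--     return {"deleted": del_dict, "showed": show_dict}
-- ===== SOURCE B (Python) =====
-- def sort_dict_token_based_list(dict_token: dict, arr_sort: list, limit_show: int = -1) -> dict:
--     # Bucket tokens by frequency once, then one pass over arr_sort: O(n + m) instead of O(n * m).
--     buckets = {}
--     for word, freq in dict_token.items():
--         buckets.setdefault(freq, []).append(word)
--     show_dict = {}
--     del_dict = {}
--     for freq in arr_sort:
--         if limit_show < 0 or freq <= limit_show: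
--             for word in buckets.get(freq, []):
--                 show_dict[word] = freq
--         else:
--             for word in buckets.get(freq, []):
--                 del_dict[word] = freq
--     return {"deleted": del_dict, "showed": show_dict}
-- ===== Notes on version B (the rewrite author's own statement) =====
-- stated objective: faster
-- what changed: Replaces the nested scan of all tokens for every value in arr_sort by a one-pass bucketing of tokens by frequency plus a single pass over arr_sort that classifies each whole bucket at once.
import Mathlib
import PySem

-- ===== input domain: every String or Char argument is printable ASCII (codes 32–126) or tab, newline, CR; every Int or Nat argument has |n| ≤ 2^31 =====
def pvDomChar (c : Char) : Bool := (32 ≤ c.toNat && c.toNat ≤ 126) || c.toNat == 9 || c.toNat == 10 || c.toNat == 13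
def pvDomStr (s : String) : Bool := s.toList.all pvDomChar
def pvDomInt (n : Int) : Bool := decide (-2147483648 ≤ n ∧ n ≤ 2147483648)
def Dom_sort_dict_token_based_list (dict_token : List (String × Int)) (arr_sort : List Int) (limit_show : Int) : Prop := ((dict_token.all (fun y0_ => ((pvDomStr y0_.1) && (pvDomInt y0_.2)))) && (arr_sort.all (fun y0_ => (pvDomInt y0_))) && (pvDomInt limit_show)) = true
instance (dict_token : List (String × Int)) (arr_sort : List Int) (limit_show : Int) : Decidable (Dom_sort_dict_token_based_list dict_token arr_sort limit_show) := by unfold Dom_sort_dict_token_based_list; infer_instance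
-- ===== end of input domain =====

-- B buckets tokens by frequency value in one pass, then classifies whole buckets in a single pass
-- over arr_sort (faster: removes the inner scan of dict_token for every element of arr_sort).


-- ===== PORT A =====
-- 'for j in dict_token: … dict_token[j] …' iterates the dict's (key, value) pairs in insertion
-- order; under the dict → association-list convention the pair's value is dict_token[j].
def sort_dict_token_based_list (dict_token : List (String × Int)) (arr_sort : List Int) (limit_show : Int) : List (String × List (String × Int)) :=
  let res := arr_sort.foldl (fun (sd : PySem.Dict String Int × PySem.Dict String Int) i =>
    dict_token.foldl (fun sd p =>
      if limit_show < 0 ∧ p.2 = i then (sd.1.insert p.1 i, sd.2)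
      else if limit_show ≥ i ∧ p.2 = i then (sd.1.insert p.1 i, sd.2)
      else if limit_show < i ∧ p.2 = i then (sd.1, sd.2.insert p.1 i)
      else sd) sd) (PySem.Dict.empty, PySem.Dict.empty)
  [("deleted", res.2.items), ("showed", res.1.items)]

-- ===== PORT B =====
def sort_dict_token_based_list_alt (dict_token : List (String × Int)) (arr_sort : List Int) (limit_show : Int) : List (String × List (String × Int)) :=
  let buckets := dict_token.foldl (fun (b : PySem.Dict Int (List String)) p => b.modify p.2 [] (· ++ [p.1])) PySem.Dict.empty
  let res := arr_sort.foldl (fun (sd : PySem.Dict String Int × PySem.Dict String Int) i =>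
    if limit_show < 0 ∨ i ≤ limit_show then
      ((buckets.getD i []).foldl (fun s w => s.insert w i) sd.1, sd.2)
    else
      (sd.1, (buckets.getD i []).foldl (fun d w => d.insert w i) sd.2)) (PySem.Dict.empty, PySem.Dict.empty)
  [("deleted", res.2.items), ("showed", res.1.items)]

-- ===== PRECONDITION & SPEC =====
def Spec_sort_dict_token_based_list (dict_token : List (String × Int)) (arr_sort : List Int) (limit_show : Int) (out : List (String × List (String × Int))) : Prop := out = sort_dict_token_based_list_alt dict_token arr_sort limit_show
instance (dict_token : List (String × Int)) (arr_sort : List Int) (limit_show : Int) (out : List (String × List (String × Int))) : Decidable (Spec_sort_dict_token_based_list dict_token arr_sort limit_show out) := by unfold Spec_sort_dict_token_based_list; infer_instance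

-- ===== CLAIM (what is proved, stated in full; the proofs are below) =====
def Claim_equal_sort_dict_token_based_list : Prop := ∀ (dict_token : List (String × Int)) (arr_sort : List Int) (limit_show : Int), Dom_sort_dict_token_based_list dict_token arr_sort limit_show → Spec_sort_dict_token_based_list dict_token arr_sort limit_show (sort_dict_token_based_list dict_token arr_sort limit_show)

-- ===== LEMMAS AND PROOFS =====

-- B's bucket for value i holds exactly the tokens whose value is i, in dict_token order.
lemma buckets_getD (dict_token : List (String × Int)) (i : Int) :
    (dict_token.foldl (fun (b : PySem.Dict Int (List String)) p => b.modify p.2 [] (· ++ [p.1])) PySem.Dict.empty).getD i []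
      = (dict_token.filter (fun p => p.2 == i)).map (·.1) := by
  have h : (dict_token.foldl (fun (b : PySem.Dict Int (List String)) p => b.modify p.2 [] (· ++ [p.1])) PySem.Dict.empty)
      = ((dict_token.map Prod.swap).foldl (fun (b : PySem.Dict Int (List String)) q => b.modify q.1 [] (· ++ [q.2])) PySem.Dict.empty) := by
    rw [List.foldl_map]
    rfl
  rw [h, PySem.Dict.getD_foldl_modify_append, PySem.Dict.getD_empty]
  rw [List.filter_map, List.map_map]
  rfl

-- One inner pass of A (over all of dict_token at value i) inserts exactly the tokens of
-- value i into show (if i is shown) or into del (otherwise).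
lemma inner_pass (dict_token : List (String × Int)) (limit_show i : Int)
    (s d : PySem.Dict String Int) :
    dict_token.foldl (fun sd p =>
      if limit_show < 0 ∧ p.2 = i then (sd.1.insert p.1 i, sd.2)
      else if limit_show ≥ i ∧ p.2 = i then (sd.1.insert p.1 i, sd.2)
      else if limit_show < i ∧ p.2 = i then (sd.1, sd.2.insert p.1 i)
      else sd) (s, d)
    = (if limit_show < 0 ∨ i ≤ limit_show then
        (((dict_token.filter (fun p => p.2 == i)).map (·.1)).foldl (fun s w => s.insert w i) s, d)
      else
        (s, ((dict_token.filter (fun p => p.2 == i)).map (·.1)).foldl (fun d w => d.insert w i) d)) := by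
  induction dict_token generalizing s d with
  | nil => simp
  | cons p l ih =>
    by_cases hv : p.2 = i
    · by_cases hc : limit_show < 0 ∨ i ≤ limit_show
      · have hstep : (if limit_show < 0 ∧ p.2 = i then (s.insert p.1 i, d)
            else if limit_show ≥ i ∧ p.2 = i then (s.insert p.1 i, d)
            else if limit_show < i ∧ p.2 = i then (s, d.insert p.1 i)
            else (s, d)) = (s.insert p.1 i, d) := by
          split_ifs with h1 h2 h3 <;> first | rfl | (exfalso; omega)
        simp only [List.foldl_cons]
        rw [hstep, ih]
        simp [hv, hc]
      · have hstep : (if limit_show < 0 ∧ p.2 = i then (s.insert p.1 i, d)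
            else if limit_show ≥ i ∧ p.2 = i then (s.insert p.1 i, d)
            else if limit_show < i ∧ p.2 = i then (s, d.insert p.1 i)
            else (s, d)) = (s, d.insert p.1 i) := by
          split_ifs with h1 h2 h3 <;> first | rfl | (exfalso; omega)
        simp only [List.foldl_cons]
        rw [hstep, ih]
        simp [hv, hc]
    · have hstep : (if limit_show < 0 ∧ p.2 = i then (s.insert p.1 i, d)
          else if limit_show ≥ i ∧ p.2 = i then (s.insert p.1 i, d)
          else if limit_show < i ∧ p.2 = i then (s, d.insert p.1 i)
          else (s, d)) = (s, d) := by
        split_ifs with h1 h2 h3 <;> first | rfl | (exact absurd h1.2 hv) | (exact absurd h2.2 hv) | (exact absurd h3.2 hv)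
      simp only [List.foldl_cons]
      rw [hstep, ih]
      simp [hv]

-- ===== VERDICT (by name: the statement is the Claim_ definition above) =====
theorem sort_dict_token_based_list_spec : Claim_equal_sort_dict_token_based_list := by
  intro dict_token arr_sort limit_show _
  unfold Spec_sort_dict_token_based_list
  unfold sort_dict_token_based_list sort_dict_token_based_list_alt
  have hfold : arr_sort.foldl (fun (sd : PySem.Dict String Int × PySem.Dict String Int) i =>
      dict_token.foldl (fun sd p =>
        if limit_show < 0 ∧ p.2 = i then (sd.1.insert p.1 i, sd.2)
        else if limit_show ≥ i ∧ p.2 = i then (sd.1.insert p.1 i, sd.2)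
        else if limit_show < i ∧ p.2 = i then (sd.1, sd.2.insert p.1 i)
        else sd) sd) (PySem.Dict.empty, PySem.Dict.empty)
    = arr_sort.foldl (fun (sd : PySem.Dict String Int × PySem.Dict String Int) i =>
      if limit_show < 0 ∨ i ≤ limit_show then
        (((dict_token.foldl (fun (b : PySem.Dict Int (List String)) p => b.modify p.2 [] (· ++ [p.1])) PySem.Dict.empty).getD i []).foldl (fun s w => s.insert w i) sd.1, sd.2)
      else
        (sd.1, ((dict_token.foldl (fun (b : PySem.Dict Int (List String)) p => b.modify p.2 [] (· ++ [p.1])) PySem.Dict.empty).getD i []).foldl (fun d w => d.insert w i) sd.2)) (PySem.Dict.empty, PySem.Dict.empty) := by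
    apply PySem.List.foldl_congr_mem
    intro sd i _
    rw [buckets_getD]
    exact inner_pass dict_token limit_show i sd.1 sd.2
  simp only [hfold]
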